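-- pv_equiv track=rewrite | github.com/6puritans9/codetree-TILs | 250325/이상한 폭탄 2/strange-bomb-2.py | find_largest_bomb
-- ===== SOURCE A (Python) =====
-- def in_valid_range(x:int, n:int) -> bool:
--     return 0<= x < n
--
-- def find_largest_bomb(n:int, k:int, bombs:list[int]) -> int:
--     # TC = O(N^2)
--     # SC = O(1)
--
--     max_bomb = 0
--
--     for i in range(n):
--         for j in range(i-k, i+k+1):
--             if in_valid_range(j, n) and i != j and bombs[i] == bombs[j]:
--                 max_bomb = max(max_bomb, bombs[i])
--                 break
--
--     return max_bomb if max_bomb else -1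
-- ===== SOURCE B (Python) =====
-- def find_largest_bomb(n: int, k: int, bombs: list[int]) -> int:
--     # One pass: remember the last index of each value; a value qualifies iff
--     # some occurrence is within distance k of the previous occurrence.
--     last = {}
--     best = -1
--     for i in range(n):
--         v = bombs[i]
--         p = last.get(v)
--         if p is not None and i - p <= k and v > best and v > 0:
--             best = v
--         last[v] = i
--     return best
-- ===== Notes on version B (the rewrite author's own statement) =====
-- stated objective: faster
-- what changed: Replaced the O(n*k) window scan per index by a single pass that keeps a dict of each value's last index and checks only the gap to the previous equal occurrence.
-- outside the precondition, e.g. on find_largest_bomb(3, -1, []): A returns -1, B raises IndexError; on find_largest_bomb(1, 5, []): A returns -1, B raises IndexError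
import Mathlib
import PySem

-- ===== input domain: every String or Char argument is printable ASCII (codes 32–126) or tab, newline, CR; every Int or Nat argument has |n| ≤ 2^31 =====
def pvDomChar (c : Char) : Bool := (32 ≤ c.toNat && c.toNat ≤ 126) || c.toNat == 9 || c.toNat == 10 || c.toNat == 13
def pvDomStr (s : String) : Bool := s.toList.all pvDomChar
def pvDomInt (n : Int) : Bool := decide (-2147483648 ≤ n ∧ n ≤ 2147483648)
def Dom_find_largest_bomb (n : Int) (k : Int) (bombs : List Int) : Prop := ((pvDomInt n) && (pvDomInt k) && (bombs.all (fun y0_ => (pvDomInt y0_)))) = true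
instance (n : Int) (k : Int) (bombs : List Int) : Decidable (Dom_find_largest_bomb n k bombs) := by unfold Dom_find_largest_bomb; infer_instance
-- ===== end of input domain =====

-- B replaces A's per-index window scan by a single pass keeping each value's last index in a dict (same return values on Pre_).


-- ===== PORT A =====
def in_valid_range (x : Int) (n : Int) : Bool := decide (0 ≤ x ∧ x < n)

-- bombs[i] / bombs[j] ported with pyGetD (the default is only a totality guard: Pre_ keeps every used index in range)
def find_largest_bomb (n : Int) (k : Int) (bombs : List Int) : Int :=
  let max_bomb := (PySem.List.pyRange 0 n 1).foldl (fun max_bomb i =>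
    -- inner 'for j … break': the first j satisfying the condition triggers the single update
    match (PySem.List.pyRange (i - k) (i + k + 1) 1).find? (fun j =>
        in_valid_range j n && decide (i ≠ j) &&
        decide (PySem.List.pyGetD bombs i 0 = PySem.List.pyGetD bombs j 0)) with
    | some _ => max max_bomb (PySem.List.pyGetD bombs i 0)
    | none => max_bomb) 0
  if max_bomb ≠ 0 then max_bomb else -1

-- ===== PORT B =====
def find_largest_bomb_alt (n : Int) (k : Int) (bombs : List Int) : Int :=
  let st := (PySem.List.pyRange 0 n 1).foldl
    (fun (st : PySem.Dict Int Int × Int) i =>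
      let v := PySem.List.pyGetD bombs i 0
      let best :=
        match st.1.get? v with
        | some p => if i - p ≤ k ∧ st.2 < v ∧ 0 < v then v else st.2
        | none => st.2
      (st.1.insert v i, best))
    (PySem.Dict.empty, -1)
  st.2

-- ===== PRECONDITION & SPEC =====
-- Pre_ excludes n > len(bombs), where A raises IndexError whenever it evaluates bombs[i]; when the
-- window never yields a candidate j (k ≤ 0, or n = 1) A happens not to index and returns -1, while
-- B indexes bombs[i] unconditionally and raises; such inputs lie outside the natural domain n ≤ len(bombs).
def Pre_find_largest_bomb (n : Int) (k : Int) (bombs : List Int) : Prop :=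
  n ≤ (bombs.length : Int)
instance (n : Int) (k : Int) (bombs : List Int) : Decidable (Pre_find_largest_bomb n k bombs) := by
  unfold Pre_find_largest_bomb; infer_instance

def pvWitness_find_largest_bomb : Int × Int × List Int := (3, 1, [2, 2, 5])

def Spec_find_largest_bomb (n : Int) (k : Int) (bombs : List Int) (out : Int) : Prop := out = find_largest_bomb_alt n k bombs
instance (n : Int) (k : Int) (bombs : List Int) (out : Int) : Decidable (Spec_find_largest_bomb n k bombs out) := by unfold Spec_find_largest_bomb; infer_instance

-- ===== CLAIM (what is proved, stated in full; the proofs are below) =====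
def Claim_equal_find_largest_bomb : Prop := ∀ (n : Int) (k : Int) (bombs : List Int), Dom_find_largest_bomb n k bombs → Pre_find_largest_bomb n k bombs → Spec_find_largest_bomb n k bombs (find_largest_bomb n k bombs)

-- ===== LEMMAS AND PROOFS =====

-- value at index i (all indices used below lie in [0, n))
def pvVal (bombs : List Int) (i : Int) : Int := PySem.List.pyGetD bombs i 0

-- i has an equal-valued neighbour inside A's window (and inside the array)
def pvMatched (n k : Int) (bombs : List Int) (i : Int) : Prop :=
  ∃ j : Int, 0 ≤ j ∧ j < n ∧ i ≠ j ∧ i - k ≤ j ∧ j < i + k + 1 ∧ pvVal bombs i = pvVal bombs j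

-- q has a previous equal element within distance k
def pvHasPrev (k : Int) (bombs : List Int) (q : Int) : Prop :=
  ∃ p : Int, 0 ≤ p ∧ p < q ∧ q - p ≤ k ∧ pvVal bombs p = pvVal bombs q

-- last index < m holding value v
def pvLastOcc (bombs : List Int) : Nat → Int → Option Int
  | 0, _ => none
  | m + 1, v => if pvVal bombs m = v then some m else pvLastOcc bombs m v

-- Bool test driving A's update, and the one driving B's update
def pvDetA (n k : Int) (bombs : List Int) (i : Int) : Bool :=
  ((PySem.List.pyRange (i - k) (i + k + 1) 1).find? (fun j =>
      in_valid_range j n && decide (i ≠ j) &&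
      decide (PySem.List.pyGetD bombs i 0 = PySem.List.pyGetD bombs j 0))).isSome

def pvDetB (k : Int) (bombs : List Int) (q : Int) : Bool :=
  match pvLastOcc bombs q.toNat (pvVal bombs q) with
  | some p => decide (q - p ≤ k ∧ 0 < pvVal bombs q)
  | none => false

-- B's loop body, named (definitionally the lambda in find_largest_bomb_alt)
def pvStepB (k : Int) (bombs : List Int) (st : PySem.Dict Int Int × Int) (i : Int) :
    PySem.Dict Int Int × Int :=
  let v := PySem.List.pyGetD bombs i 0
  let best :=
    match st.1.get? v with
    | some p => if i - p ≤ k ∧ st.2 < v ∧ 0 < v then v else st.2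
    | none => st.2
  (st.1.insert v i, best)

theorem pvLastOcc_some (bombs : List Int) (m : Nat) (v : Int) (p : Int)
    (h : pvLastOcc bombs m v = some p) :
    0 ≤ p ∧ p < (m : Int) ∧ pvVal bombs p = v := by
  induction m with
  | zero => simp [pvLastOcc] at h
  | succ m ih =>
    simp only [pvLastOcc] at h
    split at h
    · rename_i hv
      cases h
      refine ⟨by positivity, by push_cast; omega, hv⟩
    · rcases ih h with ⟨h1, h2, h3⟩
      exact ⟨h1, by push_cast; omega, h3⟩

theorem pvLastOcc_last (bombs : List Int) (m : Nat) (v : Int) (p' : Int)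
    (h0 : 0 ≤ p') (h1 : p' < (m : Int)) (hv : pvVal bombs p' = v) :
    ∃ p : Int, pvLastOcc bombs m v = some p ∧ p' ≤ p := by
  induction m with
  | zero => omega
  | succ m ih =>
    simp only [pvLastOcc]
    split
    · exact ⟨m, rfl, by push_cast at h1 ⊢; omega⟩
    · rename_i hne
      have hlt : p' < (m : Int) := by
        rcases lt_or_eq_of_le (by push_cast at h1 ⊢; omega : p' ≤ (m : Int)) with h | h
        · exact h
        · exact absurd (h ▸ hv) hne
      exact ih hlt

-- hasPrev is decided by the last occurrence
theorem pvHasPrev_iff_lastOcc (k : Int) (bombs : List Int) (q : Nat) :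
    pvHasPrev k bombs q ↔
      ∃ p : Int, pvLastOcc bombs q (pvVal bombs q) = some p ∧ (q : Int) - p ≤ k := by
  constructor
  · rintro ⟨p', h0, h1, h2, h3⟩
    rcases pvLastOcc_last bombs q (pvVal bombs q) p' h0 h1 h3 with ⟨p, hp, hle⟩
    exact ⟨p, hp, by omega⟩
  · rintro ⟨p, hp, hk⟩
    rcases pvLastOcc_some bombs q _ p hp with ⟨h0, h1, h2⟩
    exact ⟨p, h0, h1, hk, h2⟩

theorem pvDetA_iff (n k : Int) (bombs : List Int) (i : Int) :
    pvDetA n k bombs i = true ↔ pvMatched n k bombs i := by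
  unfold pvDetA
  rw [List.find?_isSome]
  constructor
  · rintro ⟨j, hmem, hp⟩
    rw [PySem.List.mem_pyRange_one] at hmem
    simp only [in_valid_range, Bool.and_eq_true, decide_eq_true_eq] at hp
    exact ⟨j, hp.1.1.1, hp.1.1.2, hp.1.2, hmem.1, hmem.2, hp.2⟩
  · rintro ⟨j, h0, h1, h2, h3, h4, h5⟩
    refine ⟨j, PySem.List.mem_pyRange_one.mpr ⟨h3, h4⟩, ?_⟩
    simp only [in_valid_range, Bool.and_eq_true, decide_eq_true_eq]
    exact ⟨⟨⟨h0, h1⟩, h2⟩, h5⟩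

theorem pvDetB_iff (k : Int) (bombs : List Int) (q : Int) (h0 : 0 ≤ q) :
    pvDetB k bombs q = true ↔ pvHasPrev k bombs q ∧ 0 < pvVal bombs q := by
  have hq : ((q.toNat : Nat) : Int) = q := Int.toNat_of_nonneg h0
  have hiff := pvHasPrev_iff_lastOcc k bombs q.toNat
  rw [hq] at hiff
  unfold pvDetB
  cases h : pvLastOcc bombs q.toNat (pvVal bombs q) with
  | none =>
    simp only [Bool.false_eq_true, false_iff]
    rintro ⟨hp, _⟩
    rcases hiff.mp hp with ⟨p, hsome, _⟩
    rw [h] at hsome; cases hsome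
  | some p =>
    simp only [decide_eq_true_eq]
    constructor
    · rintro ⟨hgap, hpos⟩
      exact ⟨hiff.mpr ⟨p, h, hgap⟩, hpos⟩
    · rintro ⟨hp, hpos⟩
      rcases hiff.mp hp with ⟨p', hsome, hgap⟩
      rw [h] at hsome; cases hsome
      exact ⟨hgap, hpos⟩

-- the values A detects are exactly the values B detects (positivity aside)
theorem pvMatched_iff_exists_hasPrev (n k : Int) (bombs : List Int) (v : Int) :
    (∃ i : Int, 0 ≤ i ∧ i < n ∧ pvMatched n k bombs i ∧ pvVal bombs i = v) ↔
    (∃ q : Int, 0 ≤ q ∧ q < n ∧ pvHasPrev k bombs q ∧ pvVal bombs q = v) := by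
  constructor
  · rintro ⟨i, hi0, hin, ⟨j, hj0, hjn, hne, hl, hr, hv⟩, hval⟩
    rcases lt_or_gt_of_ne (Ne.symm hne) with hji | hji
    · exact ⟨i, hi0, hin, ⟨j, hj0, hji, by omega, hv.symm⟩, hval⟩
    · exact ⟨j, hj0, hjn, ⟨i, hi0, hji, by omega, hv⟩, hv ▸ hval⟩
  · rintro ⟨q, hq0, hqn, ⟨p, hp0, hpq, hk, hv⟩, hval⟩
    exact ⟨q, hq0, hqn, ⟨p, hp0, by omega, by omega, by omega, by omega, hv.symm⟩, hval⟩

-- A's loop is a running max over the matched indices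
theorem pvA_fold (n k : Int) (bombs : List Int) :
    (PySem.List.pyRange 0 n 1).foldl (fun max_bomb i =>
      match (PySem.List.pyRange (i - k) (i + k + 1) 1).find? (fun j =>
          in_valid_range j n && decide (i ≠ j) &&
          decide (PySem.List.pyGetD bombs i 0 = PySem.List.pyGetD bombs j 0)) with
      | some _ => max max_bomb (PySem.List.pyGetD bombs i 0)
      | none => max_bomb) 0
    = (((PySem.List.pyRange 0 n 1).filter (pvDetA n k bombs)).map (pvVal bombs)).foldl max 0 := by
  rw [List.foldl_map,
    ← PySem.List.foldl_if_eq_foldl_filter (p := pvDetA n k bombs)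
      (f := fun mb i => max mb (pvVal bombs i))]
  apply PySem.List.foldl_congr_mem
  intro acc i _
  unfold pvDetA pvVal
  cases h : (PySem.List.pyRange (i - k) (i + k + 1) 1).find? (fun j =>
      in_valid_range j n && decide (i ≠ j) &&
      decide (PySem.List.pyGetD bombs i 0 = PySem.List.pyGetD bombs j 0)) with
  | none => simp
  | some j => simp

theorem pvStepB_char (k : Int) (bombs : List Int) (m : Nat)
    (st : PySem.Dict Int Int × Int)
    (hd : ∀ v : Int, st.1.get? v = pvLastOcc bombs m v) :
    pvStepB k bombs st (m : Int)
      = (st.1.insert (pvVal bombs (m : Int)) (m : Int),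
         cond (pvDetB k bombs (m : Int)) (max st.2 (pvVal bombs (m : Int))) st.2) := by
  unfold pvStepB pvDetB
  simp only [Prod.mk.injEq, Int.toNat_natCast]
  refine ⟨rfl, ?_⟩
  rw [show PySem.List.pyGetD bombs (m : Int) 0 = pvVal bombs (m : Int) from rfl, hd]
  obtain hE | ⟨p, hE⟩ := Option.eq_none_or_eq_some (pvLastOcc bombs m (pvVal bombs (m : Int)))
  · rw [hE]; simp
  · rw [hE]
    simp only [Bool.cond_decide]
    split_ifs <;> omega

-- B's invariant: after the first m indices the dict maps each value to its last
-- occurrence and best is the running max over detected positive values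
theorem pvB_fold (k : Int) (bombs : List Int) (m : Nat) :
    (∀ v : Int, (((PySem.List.pyRange 0 (m : Int) 1).foldl (pvStepB k bombs)
        (PySem.Dict.empty, -1)).1).get? v = pvLastOcc bombs m v) ∧
    ((PySem.List.pyRange 0 (m : Int) 1).foldl (pvStepB k bombs) (PySem.Dict.empty, -1)).2
      = (((PySem.List.pyRange 0 (m : Int) 1).filter (pvDetB k bombs)).map
          (pvVal bombs)).foldl max (-1) := by
  induction m with
  | zero =>
    refine ⟨fun v => ?_, ?_⟩
    · simp [PySem.List.pyRange_one_eq_nil, pvLastOcc, PySem.Dict.get?_empty]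
    · simp [PySem.List.pyRange_one_eq_nil]
  | succ m ih =>
    obtain ⟨ih1, ih2⟩ := ih
    have hsplit : PySem.List.pyRange 0 ((m + 1 : Nat) : Int) 1
        = PySem.List.pyRange 0 (m : Int) 1 ++ [(m : Int)] := by
      have hc : ((m + 1 : Nat) : Int) = (m : Int) + 1 := by push_cast; ring
      rw [hc, PySem.List.pyRange_one_succ_right (by positivity)]
    rw [hsplit]
    simp only [List.foldl_append, List.filter_append, List.map_append, List.foldl_cons,
      List.foldl_nil]
    rw [pvStepB_char k bombs m _ ih1]
    constructor
    · intro v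
      rw [PySem.Dict.get?_insert, ih1]
      show _ = pvLastOcc bombs (m + 1) v
      simp only [pvLastOcc]
      by_cases hv : v = pvVal bombs (m : Int)
      · rw [if_pos hv, if_pos (by rw [hv])]
      · rw [if_neg hv, if_neg (fun h => hv (by rw [← h]))]
    · cases hdet : pvDetB k bombs (m : Int) with
      | false => simp [hdet, ih2]
      | true => simp [hdet, ih2]

-- the top-level comparison of the two running maxima
theorem pvMax_compare (n k : Int) (bombs : List Int) (LA LB : List Int)
    (hA : ∀ v, v ∈ LA ↔ ∃ i : Int, 0 ≤ i ∧ i < n ∧ pvMatched n k bombs i ∧ pvVal bombs i = v)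
    (hB : ∀ v, v ∈ LB ↔ ∃ q : Int, 0 ≤ q ∧ q < n ∧ (pvHasPrev k bombs q ∧ 0 < pvVal bombs q) ∧ pvVal bombs q = v) :
    (if LA.foldl max 0 ≠ 0 then LA.foldl max 0 else -1) = LB.foldl max (-1) := by
  have hBpos : ∀ v ∈ LB, 0 < v := by
    intro v hv; rcases (hB v).mp hv with ⟨q, _, _, ⟨_, hpos⟩, hval⟩; omega
  have hAB : ∀ v, v ∈ LB ↔ (v ∈ LA ∧ 0 < v) := by
    intro v
    rw [hA, hB]
    constructor
    · rintro ⟨q, h0, h1, ⟨h2, h3⟩, h4⟩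
      exact ⟨(pvMatched_iff_exists_hasPrev n k bombs v).mpr ⟨q, h0, h1, h2, h4⟩, h4 ▸ h3⟩
    · rintro ⟨hm, hpos⟩
      rcases (pvMatched_iff_exists_hasPrev n k bombs v).mp hm with ⟨q, h0, h1, h2, h4⟩
      exact ⟨q, h0, h1, ⟨h2, h4 ▸ hpos⟩, h4⟩
  rcases PySem.List.foldl_max_mem LB (-1) with hRB | hRB
  · rw [hRB]
    have hLBempty : ∀ v, v ∉ LB := by
      intro v hv
      have h1 := (PySem.List.le_foldl_max LB (-1)).2 v hv
      have := hBpos v hv; omega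
    rcases PySem.List.foldl_max_mem LA 0 with hRA | hRA
    · simp [hRA]
    · have h0 : (0:Int) ≤ LA.foldl max 0 := (PySem.List.le_foldl_max LA 0).1
      have hle : LA.foldl max 0 ≤ 0 := by
        by_contra hgt
        exact hLBempty _ ((hAB _).mpr ⟨hRA, by omega⟩)
      simp [show LA.foldl max 0 = 0 by omega]
  · have hRBpos : 0 < LB.foldl max (-1) := hBpos _ hRB
    have hRBinLA : LB.foldl max (-1) ∈ LA := ((hAB _).mp hRB).1
    have hle1 : LB.foldl max (-1) ≤ LA.foldl max 0 := (PySem.List.le_foldl_max LA 0).2 _ hRBinLA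
    have hRApos : 0 < LA.foldl max 0 := by omega
    rcases PySem.List.foldl_max_mem LA 0 with hRA | hRA
    · omega
    · have hRAinLB : LA.foldl max 0 ∈ LB := (hAB _).mpr ⟨hRA, hRApos⟩
      have hle2 : LA.foldl max 0 ≤ LB.foldl max (-1) := (PySem.List.le_foldl_max LB (-1)).2 _ hRAinLB
      have heq : LA.foldl max 0 = LB.foldl max (-1) := le_antisymm hle2 hle1
      rw [if_pos (by omega), heq]

theorem pvLA_mem (n k : Int) (bombs : List Int) : ∀ v : Int,
    v ∈ ((PySem.List.pyRange 0 n 1).filter (pvDetA n k bombs)).map (pvVal bombs) ↔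
      ∃ i : Int, 0 ≤ i ∧ i < n ∧ pvMatched n k bombs i ∧ pvVal bombs i = v := by
  intro v
  simp only [List.mem_map, List.mem_filter, PySem.List.mem_pyRange_one, pvDetA_iff]
  constructor
  · rintro ⟨i, ⟨⟨h0, h1⟩, h2⟩, h3⟩; exact ⟨i, h0, h1, h2, h3⟩
  · rintro ⟨i, h0, h1, h2, h3⟩; exact ⟨i, ⟨⟨h0, h1⟩, h2⟩, h3⟩

theorem pvLB_mem (n k : Int) (bombs : List Int) : ∀ v : Int,
    v ∈ ((PySem.List.pyRange 0 n 1).filter (pvDetB k bombs)).map (pvVal bombs) ↔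
      ∃ q : Int, 0 ≤ q ∧ q < n ∧ (pvHasPrev k bombs q ∧ 0 < pvVal bombs q) ∧ pvVal bombs q = v := by
  intro v
  simp only [List.mem_map, List.mem_filter, PySem.List.mem_pyRange_one]
  constructor
  · rintro ⟨q, ⟨⟨h0, h1⟩, h2⟩, h3⟩
    exact ⟨q, h0, h1, (pvDetB_iff k bombs q h0).mp h2, h3⟩
  · rintro ⟨q, h0, h1, h2, h3⟩
    exact ⟨q, ⟨⟨h0, h1⟩, (pvDetB_iff k bombs q h0).mpr h2⟩, h3⟩

-- ===== VERDICT (by name: the statement is the Claim_ definition above) =====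
theorem find_largest_bomb_spec : Claim_equal_find_largest_bomb := by
  intro n k bombs _ _
  unfold Spec_find_largest_bomb
  have hBdef : find_largest_bomb_alt n k bombs
      = ((PySem.List.pyRange 0 n 1).foldl (pvStepB k bombs) (PySem.Dict.empty, -1)).2 := rfl
  by_cases hn : n ≤ 0
  · rw [hBdef]
    rw [show find_largest_bomb n k bombs = -1 by
      unfold find_largest_bomb
      rw [PySem.List.pyRange_one_eq_nil hn]
      simp]
    rw [PySem.List.pyRange_one_eq_nil hn]
    simp
  · have hm : ((n.toNat : Nat) : Int) = n := Int.toNat_of_nonneg (by omega)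
    have hBfold := (pvB_fold k bombs n.toNat).2
    rw [hm] at hBfold
    have hAfold := pvA_fold n k bombs
    unfold find_largest_bomb
    rw [hBdef, hBfold]
    show (if _ ≠ 0 then _ else -1) = _
    rw [hAfold]
    exact pvMax_compare n k bombs _ _ (pvLA_mem n k bombs) (pvLB_mem n k bombs)
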